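-- pv_equiv track=rewrite | github.com/Oliver-Akins/daily-programming-challenge | 2020-05-04/part_2.py | light_range
-- ===== SOURCE A (Python) =====
-- def light_range(coord1x, coord1y, coord2x, coord2y):
-- 	coord1x = int(coord1x)
-- 	coord1y = int(coord1y)
-- 	coord2x = int(coord2x)
-- 	coord2y = int(coord2y)
-- 	for row in range(coord1y, coord2y + 1):
-- 		for col in range(coord1x, coord2x + 1):
-- 			yield (row, col)
-- ===== SOURCE B (Python) =====
-- def light_range(coord1x, coord1y, coord2x, coord2y):
--     coord1x = int(coord1x)
--     coord1y = int(coord1y)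
--     coord2x = int(coord2x)
--     coord2y = int(coord2y)
--     w = max(0, coord2x - coord1x + 1)
--     h = max(0, coord2y - coord1y + 1)
--     for i in range(h * w):
--         yield (coord1y + i // w, coord1x + i % w)
-- ===== Notes on version B (the rewrite author's own statement) =====
-- stated objective: alternative
-- what changed: Replaces the nested row/column loops with a single flat loop over h*w indices that reconstructs each (row, col) pair via divmod, with width/height clamped to 0 so empty rectangles yield nothing.
import Mathlib
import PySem

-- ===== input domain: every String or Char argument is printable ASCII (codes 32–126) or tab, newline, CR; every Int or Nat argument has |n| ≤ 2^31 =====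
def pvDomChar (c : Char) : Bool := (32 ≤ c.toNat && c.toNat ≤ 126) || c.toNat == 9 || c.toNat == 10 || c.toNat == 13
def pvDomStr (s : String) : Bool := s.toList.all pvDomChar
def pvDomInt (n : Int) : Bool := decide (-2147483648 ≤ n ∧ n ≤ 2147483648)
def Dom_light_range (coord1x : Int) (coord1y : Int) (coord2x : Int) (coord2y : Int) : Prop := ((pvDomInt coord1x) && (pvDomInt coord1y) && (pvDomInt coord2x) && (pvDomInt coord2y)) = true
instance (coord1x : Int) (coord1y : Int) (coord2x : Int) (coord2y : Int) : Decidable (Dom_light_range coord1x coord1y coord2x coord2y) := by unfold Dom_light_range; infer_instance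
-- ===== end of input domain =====

-- B replaces the nested row/column loops with one flat loop over h*w indices, recovering (row, col) by divmod; same cost, different decomposition.

-- ===== PORT A =====
-- nested loops: for row in range(c1y, c2y+1): for col in range(c1x, c2x+1): yield (row, col)
def light_range (coord1x : Int) (coord1y : Int) (coord2x : Int) (coord2y : Int) : List (Int × Int) :=
  (PySem.List.pyRange coord1y (coord2y + 1) 1).flatMap
    (fun row => (PySem.List.pyRange coord1x (coord2x + 1) 1).map (fun col => (row, col)))

-- ===== PORT B =====
-- w = max(0, c2x-c1x+1); h = max(0, c2y-c1y+1); for i in range(h*w): yield (c1y + i//w, c1x + i%w)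
def light_range_alt (coord1x : Int) (coord1y : Int) (coord2x : Int) (coord2y : Int) : List (Int × Int) :=
  let w : Int := max 0 (coord2x - coord1x + 1)
  let h : Int := max 0 (coord2y - coord1y + 1)
  (PySem.List.pyRange 0 (h * w) 1).map
    (fun i => (coord1y + PySem.Int.floordiv i w, coord1x + PySem.Int.mod i w))

-- ===== PRECONDITION & SPEC =====
def Spec_light_range (coord1x : Int) (coord1y : Int) (coord2x : Int) (coord2y : Int) (out : List (Int × Int)) : Prop := out = light_range_alt coord1x coord1y coord2x coord2y
instance (coord1x : Int) (coord1y : Int) (coord2x : Int) (coord2y : Int) (out : List (Int × Int)) : Decidable (Spec_light_range coord1x coord1y coord2x coord2y out) := by unfold Spec_light_range; infer_instance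

-- ===== CLAIM (what is proved, stated in full; the proofs are below) =====
def Claim_equal_light_range : Prop := ∀ (coord1x : Int) (coord1y : Int) (coord2x : Int) (coord2y : Int), Dom_light_range coord1x coord1y coord2x coord2y → Spec_light_range coord1x coord1y coord2x coord2y (light_range coord1x coord1y coord2x coord2y)

-- ===== LEMMAS AND PROOFS =====

-- any integer range with step 1 can be written with an explicit nonnegative length
theorem pv_range_shift (a b : Int) :
    PySem.List.pyRange a b 1 = PySem.List.pyRange a (a + ((b - a).toNat : Int)) 1 := by
  rw [PySem.List.pyRange_one, PySem.List.pyRange_one]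
  have h1 : a + ((b - a).toNat : Int) - a = ((b - a).toNat : Int) := by ring
  rw [h1, Int.toNat_natCast]

-- one row of the flat pass equals one inner loop of A
theorem pv_block (a b w : Int) (h : Nat) (hw : 0 < w) :
    (PySem.List.pyRange ((h : Int) * w) ((h : Int) * w + w) 1).map
      (fun i => (b + PySem.Int.floordiv i w, a + PySem.Int.mod i w))
    = (PySem.List.pyRange a (a + w) 1).map (fun col => ((b + (h : Int)), col)) := by
  rw [PySem.List.pyRange_one, PySem.List.pyRange_one]
  have hlen : ((h : Int) * w + w - (h : Int) * w).toNat = (a + w - a).toNat := by omega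
  rw [hlen, List.map_map, List.map_map]
  refine List.map_congr_left ?_
  intro k hk
  have hk' : (k : Int) < w := by
    have := List.mem_range.mp hk
    omega
  have hk0 : (0 : Int) ≤ (k : Int) := Int.natCast_nonneg k
  have hdiv : PySem.Int.floordiv ((h : Int) * w + (k : Int)) w = (h : Int) := by
    rw [PySem.Int.floordiv_eq_iff_of_pos hw]
    constructor
    · linarith
    · have : ((h : Int) + 1) * w = (h : Int) * w + w := by ring
      rw [this]; linarith
  have hmod : PySem.Int.mod ((h : Int) * w + (k : Int)) w = (k : Int) := by
    have hfm := PySem.Int.floordiv_mul_add_mod ((h : Int) * w + (k : Int)) w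
    rw [hdiv] at hfm
    linarith
  simp only [Function.comp]
  rw [hdiv, hmod]

-- the flat divmod pass equals the nested loops, for a width/height written as (Nat, nonneg Int)
theorem pv_key (a b w : Int) (hw : 0 ≤ w) (h : Nat) :
    (PySem.List.pyRange b (b + (h : Int)) 1).flatMap
      (fun row => (PySem.List.pyRange a (a + w) 1).map (fun col => (row, col)))
    = (PySem.List.pyRange 0 ((h : Int) * w) 1).map
        (fun i => (b + PySem.Int.floordiv i w, a + PySem.Int.mod i w)) := by
  induction h with
  | zero =>
      simp [PySem.List.pyRange_one_eq_nil]
  | succ h ih =>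
      have h1 : b + ((h + 1 : Nat) : Int) = (b + (h : Int)) + 1 := by push_cast; ring
      rw [h1, PySem.List.pyRange_one_succ_right (by omega : b ≤ b + (h : Int)),
          List.flatMap_append, ih]
      have h2 : ((h + 1 : Nat) : Int) * w = (h : Int) * w + w := by push_cast; ring
      have h3 : (0 : Int) ≤ (h : Int) * w := by positivity
      rw [h2, PySem.List.pyRange_one_append 0 ((h : Int) * w) ((h : Int) * w + w) h3 (by linarith),
          List.map_append]
      congr 1
      rcases lt_or_eq_of_le hw with hw' | hw'
      · rw [pv_block a b w h hw']
        simp [List.flatMap]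
      · rw [← hw']
        simp [PySem.List.pyRange_one_eq_nil]

-- ===== VERDICT (by name: the statement is the Claim_ definition above) =====
theorem light_range_spec : Claim_equal_light_range := by
  intro c1x c1y c2x c2y _
  show light_range c1x c1y c2x c2y = light_range_alt c1x c1y c2x c2y
  unfold light_range light_range_alt
  have hw : max 0 (c2x - c1x + 1) = (((c2x + 1 - c1x).toNat : Nat) : Int) := by omega
  have hh : max 0 (c2y - c1y + 1) = (((c2y + 1 - c1y).toNat : Nat) : Int) := by omega
  rw [pv_range_shift c1y (c2y + 1), pv_range_shift c1x (c2x + 1), hw, hh]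
  exact pv_key c1x c1y _ (Int.natCast_nonneg _) _
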